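-- pv_equiv track=rewrite | github.com/bamertl/cyberpython | assign1/Ex6.py | ASCII2string
-- ===== SOURCE A (Python) =====
-- def ASCII2string(number):
--     number = hex(number)
--     s = str(number)
--     s = s[2:]
--
--     nchars = len(s)
--     out = ""
--     for byte in range(0, nchars - 1, 2):
--         value = s[byte] + s[byte + 1]
--         value = chr(int(value, 16))
--         out += value
--     return out
-- ===== SOURCE B (Python) =====
-- def ASCII2string(number):
--     s = hex(number)[2:]
--     if len(s) % 2:
--         s = s[:-1]          # the loop in A never reads a lone trailing nibble
--     return bytes.fromhex(s).decode('latin-1')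
-- ===== Notes on version B (the rewrite author's own statement) =====
-- stated objective: idiomatic
-- what changed: Replaces the explicit index loop with stride-2 slicing and per-pair chr/int calls by an odd-length trim followed by bytes.fromhex + latin-1 decode, threading a bytes object instead of concatenating one-char strings.
import Mathlib
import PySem

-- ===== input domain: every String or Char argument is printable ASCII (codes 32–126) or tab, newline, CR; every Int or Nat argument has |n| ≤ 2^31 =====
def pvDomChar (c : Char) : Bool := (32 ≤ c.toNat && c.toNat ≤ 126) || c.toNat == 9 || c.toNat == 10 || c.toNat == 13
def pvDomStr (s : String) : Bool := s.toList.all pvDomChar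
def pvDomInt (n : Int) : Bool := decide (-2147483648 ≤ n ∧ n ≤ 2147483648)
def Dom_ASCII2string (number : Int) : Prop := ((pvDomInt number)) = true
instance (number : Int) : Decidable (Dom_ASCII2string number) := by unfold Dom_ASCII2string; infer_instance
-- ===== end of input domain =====

-- B replaces A's index loop (stride-2 range, chr(int(pair,16)), string concatenation) by an
-- odd-length trim followed by pairwise bytes.fromhex-style decoding (latin-1 = chr on 0..255).

-- ===== PORT A =====

-- hex digit character, lowercase, exact for 0 ≤ d < 16 (Python's hex uses lowercase)
def hexDigitChar (d : Nat) : Char := if d < 10 then Char.ofNat (48 + d) else Char.ofNat (87 + d)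

-- digits of n in base 16, most significant first ([] for 0); hand port of hex(n) for n > 0, exact there
def hexDigitsAux (n : Nat) : List Char :=
  if n = 0 then [] else hexDigitsAux (n / 16) ++ [hexDigitChar (n % 16)]
decreasing_by exact Nat.div_lt_self (Nat.pos_of_ne_zero (by assumption)) (by norm_num)

-- hex(number) for number ≥ 0 (as a char list, with the "0x" prefix); exact for 0 ≤ number
def pyHex (number : Int) : List Char :=
  '0' :: 'x' :: (if number = 0 then ['0'] else hexDigitsAux number.toNat)

-- int(value, 16) for a two-lowercase-hex-digit value, then chr: exact on the digits hex() emits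
def hexVal (c : Char) : Nat := if c.toNat < 97 then c.toNat - 48 else c.toNat - 87

def ASCII2string (number : Int) : String :=
  let s : List Char := PySem.List.slice (pyHex number) (some 2) none   -- s = str(hex(number))[2:]
  let nchars : Int := s.length
  ((PySem.List.pyRange 0 (nchars - 1) 2).foldl (fun out byte =>
      -- value = s[byte] + s[byte+1]; value = chr(int(value, 16)); out += value
      out ++ [Char.ofNat (hexVal (PySem.List.pyGetD s byte ' ') * 16 +
                          hexVal (PySem.List.pyGetD s (byte + 1) ' '))]) []) |> String.ofList

-- ===== PORT B =====

-- bytes.fromhex + latin-1 decode, hand-ported pair by pair; exact for even-length lowercase hex input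
def decodePairs : List Char → List Char
  | a :: b :: rest => Char.ofNat (hexVal a * 16 + hexVal b) :: decodePairs rest
  | _ => []

def ASCII2string_alt (number : Int) : String :=
  let s : List Char := PySem.List.slice (pyHex number) (some 2) none   -- s = hex(number)[2:]
  let s : List Char := if s.length % 2 = 1 then s.dropLast else s     -- drop lone trailing nibble
  String.ofList (decodePairs s)

-- ===== PRECONDITION & SPEC =====
-- Pre_ excludes number < 0: there hex(number)[2:] starts with 'x' and Python A raises ValueError
-- at int(value, 16) (B's bytes.fromhex raises there too).
def Pre_ASCII2string (number : Int) : Prop := 0 ≤ number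
instance (number : Int) : Decidable (Pre_ASCII2string number) := by unfold Pre_ASCII2string; infer_instance
def pvWitness_ASCII2string : Int := (104)

def Spec_ASCII2string (number : Int) (out : String) : Prop := out = ASCII2string_alt number
instance (number : Int) (out : String) : Decidable (Spec_ASCII2string number out) := by unfold Spec_ASCII2string; infer_instance

-- ===== CLAIM (what is proved, stated in full; the proofs are below) =====
def Claim_equal_ASCII2string : Prop := ∀ (number : Int), Dom_ASCII2string number → Pre_ASCII2string number → Spec_ASCII2string number (ASCII2string number)

-- ===== LEMMAS AND PROOFS =====

theorem decodePairs_dropLast (s : List Char) (h : s.length % 2 = 1) :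
    decodePairs s.dropLast = decodePairs s := by
  induction s using decodePairs.induct with
  | case1 a b rest ih =>
    cases rest with
    | nil => simp at h
    | cons c t =>
      simp only [List.length_cons] at h ih ⊢
      have : (a :: b :: c :: t).dropLast = a :: b :: (c :: t).dropLast := by simp
      rw [this]
      simp only [decodePairs]
      rw [ih (by omega)]
  | case2 t ht =>
    cases t with
    | nil => simp [decodePairs]
    | cons a t' =>
      cases t' with
      | nil => simp [decodePairs, List.dropLast]
      | cons b t'' => exact absurd rfl (ht a b t'')

theorem fold_eq (cs : List Char) (out : List Char) :
    (List.range (cs.length / 2)).foldl (fun (out : List Char) (k : Nat) =>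
      out ++ [Char.ofNat (hexVal (PySem.List.pyGetD cs (0 + 2 * (k : Int)) ' ') * 16 +
              hexVal (PySem.List.pyGetD cs (0 + 2 * (k : Int) + 1) ' '))]) out
    = out ++ decodePairs cs := by
  induction cs using decodePairs.induct generalizing out with
  | case1 a b rest ih =>
    have hlen : (a :: b :: rest).length / 2 = rest.length / 2 + 1 := by
      simp only [List.length_cons]; omega
    rw [hlen, List.range_succ_eq_map, List.foldl_cons, List.foldl_map]
    have h0 : (0 : Int) + 2 * ((0 : Nat) : Int) = 0 := by norm_num
    simp only [h0]
    have hget0 : PySem.List.pyGetD (a :: b :: rest) (0 : Int) ' ' = a := by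
      rw [show (0 : Int) = ((0 : Nat) : Int) from rfl, PySem.List.pyGetD_natCast]; rfl
    have hget1 : PySem.List.pyGetD (a :: b :: rest) ((0 : Int) + 1) ' ' = b := by
      have : ((0 : Int) + 1) = ((1 : Nat) : Int) := by norm_num
      rw [this, PySem.List.pyGetD_natCast]; rfl
    rw [hget0, hget1]
    have hshift : ∀ (k : Nat) (o : List Char),
        (fun (o : List Char) (k : Nat) =>
          o ++ [Char.ofNat (hexVal (PySem.List.pyGetD (a :: b :: rest) (0 + 2 * ((k + 1 : Nat) : Int)) ' ') * 16 +
                hexVal (PySem.List.pyGetD (a :: b :: rest) (0 + 2 * ((k + 1 : Nat) : Int) + 1) ' '))]) o k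
        = (fun (o : List Char) (k : Nat) =>
          o ++ [Char.ofNat (hexVal (PySem.List.pyGetD rest (0 + 2 * (k : Int)) ' ') * 16 +
                hexVal (PySem.List.pyGetD rest (0 + 2 * (k : Int) + 1) ' '))]) o k := by
      intro k o
      have e1 : (0 : Int) + 2 * ((k + 1 : Nat) : Int) = (((2 * k + 2 : Nat)) : Int) := by push_cast; ring
      have e2 : (0 : Int) + 2 * ((k + 1 : Nat) : Int) + 1 = (((2 * k + 3 : Nat)) : Int) := by push_cast; ring
      have e3 : (0 : Int) + 2 * ((k : Nat) : Int) = (((2 * k : Nat)) : Int) := by push_cast; ring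
      have e4 : (0 : Int) + 2 * ((k : Nat) : Int) + 1 = (((2 * k + 1 : Nat)) : Int) := by push_cast; ring
      have e2' : (((2 * k + 2 : Nat)) : Int) + 1 = (((2 * k + 3 : Nat)) : Int) := by push_cast; ring
      have e4' : (((2 * k : Nat)) : Int) + 1 = (((2 * k + 1 : Nat)) : Int) := by push_cast; ring
      simp only [e1, e3, e2', e4', PySem.List.pyGetD_natCast]
      have g1 : (a :: b :: rest).getD (2 * k + 2) ' ' = rest.getD (2 * k) ' ' := by rfl
      have g2 : (a :: b :: rest).getD (2 * k + 3) ' ' = rest.getD (2 * k + 1) ' ' := by rfl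
      rw [g1, g2]
    have hfun : (fun (o : List Char) (k : Nat) =>
          o ++ [Char.ofNat (hexVal (PySem.List.pyGetD (a :: b :: rest) (0 + 2 * ((k + 1 : Nat) : Int)) ' ') * 16 +
                hexVal (PySem.List.pyGetD (a :: b :: rest) (0 + 2 * ((k + 1 : Nat) : Int) + 1) ' '))])
        = (fun (o : List Char) (k : Nat) =>
          o ++ [Char.ofNat (hexVal (PySem.List.pyGetD rest (0 + 2 * (k : Int)) ' ') * 16 +
                hexVal (PySem.List.pyGetD rest (0 + 2 * (k : Int) + 1) ' '))]) := by
      funext o k; exact hshift k o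
    rw [hfun, ih]
    simp [decodePairs]
  | case2 t ht =>
    cases t with
    | nil => simp [decodePairs]
    | cons a t' =>
      cases t' with
      | nil => simp [decodePairs]
      | cons b t'' => exact absurd rfl (ht a b t'')

theorem range_count (cs : List Char) :
    PySem.List.pyRange 0 ((cs.length : Int) - 1) 2
      = (List.range (cs.length / 2)).map (fun (k : Nat) => (0 : Int) + 2 * (k : Int)) := by
  rw [PySem.List.pyRange_of_pos 0 ((cs.length : Int) - 1) (by norm_num)]
  congr 1
  by_cases h : (0 : Int) < (cs.length : Int) - 1
  · simp only [if_pos h]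
    congr 1
    omega
  · simp only [if_neg h]
    congr 1
    omega

-- ===== VERDICT (by name: the statement is the Claim_ definition above) =====
theorem ASCII2string_spec : Claim_equal_ASCII2string := by
  intro number _ _
  unfold Spec_ASCII2string ASCII2string ASCII2string_alt
  set s : List Char := PySem.List.slice (pyHex number) (some 2) none with hs
  simp only []
  rw [range_count s, List.foldl_map, fold_eq s []]
  by_cases hodd : s.length % 2 = 1
  · rw [if_pos hodd, decodePairs_dropLast s hodd]
    simp
  · rw [if_neg hodd]
    simp
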